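-- pv_equiv track=rewrite | github.com/GameMaker2k/LoveSoStrong | chat_archive_tool.py | encode_to_text_v2
-- ===== SOURCE A (Python) =====
-- def encode_to_text_v2(data):
--     from collections import defaultdict
--     threads = defaultdict(list)
--     for row in data:
--         msg_id, author, message, thread, category, timestamp, nested = row
--         threads[(thread.strip(), category.strip())].append({
--             "id": msg_id,
--             "author": author.strip(),
--             "time": timestamp.strip(),
--             "nested": nested,
--             "message": message.strip()
--         })
--
--     lines = [
--         "# Archive Info",
--         "SERVICE: ChatGPT Interaction Log",
--         "TYPE: Interactive Chat",
--         "LOCATION: https://chatgpt.com/",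
--         "TIMEZONE: UTC",
--         "INFO: ChatGPT is a chatbot developed by OpenAI.",
--         "",
--         "# Threads"
--     ]
--
--     for (thread, category), messages in threads.items():
--         lines.append("THREAD: {} | Category: {}".format(thread, category))
--         lines.append("")
--         for msg in messages:
--             lines.append("ID: {}".format(msg["id"]))
--             lines.append("Author: {}".format(msg["author"]))
--             lines.append("Time: {}".format(msg["time"]))
--             lines.append("Nested: {}".format(msg["nested"]))
--             lines.append("Message:")
--             lines.extend(msg["message"].splitlines())
--             lines.append("")  # blank line between messages
--
--     return "\n".join(lines)
-- ===== SOURCE B (Python) =====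
-- def encode_to_text_v2(data):
--     # index-free decomposition: distinct keys first, then one filtering scan per key
--     keys = list(dict.fromkeys(
--         (thread.strip(), category.strip())
--         for (_id, _author, _msg, thread, category, _ts, _nested) in data
--     ))
--     lines = [
--         "# Archive Info",
--         "SERVICE: ChatGPT Interaction Log",
--         "TYPE: Interactive Chat",
--         "LOCATION: https://chatgpt.com/",
--         "TIMEZONE: UTC",
--         "INFO: ChatGPT is a chatbot developed by OpenAI.",
--         "",
--         "# Threads",
--     ]
--     for key in keys:
--         lines.append("THREAD: {} | Category: {}".format(key[0], key[1]))
--         lines.append("")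
--         for (msg_id, author, message, thread, category, timestamp, nested) in data:
--             if (thread.strip(), category.strip()) == key:
--                 lines.append("ID: {}".format(msg_id))
--                 lines.append("Author: {}".format(author.strip()))
--                 lines.append("Time: {}".format(timestamp.strip()))
--                 lines.append("Nested: {}".format(nested))
--                 lines.append("Message:")
--                 lines.extend(message.strip().splitlines())
--                 lines.append("")
--     return "\n".join(lines)
-- ===== Notes on version B (the rewrite author's own statement) =====
-- stated objective: alternative
-- what changed: B drops A's single-pass defaultdict index: it first computes the distinct (thread.strip(), category.strip()) keys in first-appearance order via dict.fromkeys, then re-scans the full data list once per key, emitting matching rows directly; no grouping structure is ever built.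
import Mathlib
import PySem

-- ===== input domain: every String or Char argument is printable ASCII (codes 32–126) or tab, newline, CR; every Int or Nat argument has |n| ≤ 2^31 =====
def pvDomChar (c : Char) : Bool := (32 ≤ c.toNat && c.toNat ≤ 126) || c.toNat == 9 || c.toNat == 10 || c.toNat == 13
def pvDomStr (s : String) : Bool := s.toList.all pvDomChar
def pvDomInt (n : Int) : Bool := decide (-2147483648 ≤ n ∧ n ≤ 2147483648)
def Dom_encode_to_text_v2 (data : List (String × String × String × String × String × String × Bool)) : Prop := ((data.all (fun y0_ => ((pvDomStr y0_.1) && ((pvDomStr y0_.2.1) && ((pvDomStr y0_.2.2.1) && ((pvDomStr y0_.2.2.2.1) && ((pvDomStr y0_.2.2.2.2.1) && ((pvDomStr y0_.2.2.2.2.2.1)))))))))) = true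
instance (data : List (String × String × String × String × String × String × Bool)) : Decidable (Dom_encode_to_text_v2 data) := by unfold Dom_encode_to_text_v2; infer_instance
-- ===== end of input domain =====

-- B replaces A's single-pass defaultdict grouping by "distinct keys first, then one filtering
-- scan of data per key" (alternative decomposition; same output, no index maintained).


-- row = (msg_id, author, message, thread, category, timestamp, nested)
-- (thread.strip(), category.strip()) — the grouping key
def pvKeyOf (row : String × String × String × String × String × String × Bool) : String × String :=
  (PySem.Str.strip row.2.2.2.1, PySem.Str.strip row.2.2.2.2.1)

def pvHeader : List String :=
  ["# Archive Info",
   "SERVICE: ChatGPT Interaction Log",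
   "TYPE: Interactive Chat",
   "LOCATION: https://chatgpt.com/",
   "TIMEZONE: UTC",
   "INFO: ChatGPT is a chatbot developed by OpenAI.",
   "",
   "# Threads"]

-- ===== PORT A =====
-- the per-message dict A appends: {"id","author","time","nested","message"} as a tuple in that order
def pvMsgOf (row : String × String × String × String × String × String × Bool) :
    String × String × String × Bool × String :=
  (row.1, PySem.Str.strip row.2.1, PySem.Str.strip row.2.2.2.2.2.1, row.2.2.2.2.2.2,
   PySem.Str.strip row.2.2.1)

def pvMsgLines (m : String × String × String × Bool × String) : List String :=
  ["ID: " ++ m.1, "Author: " ++ m.2.1, "Time: " ++ m.2.2.1,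
   "Nested: " ++ (if m.2.2.2.1 then "True" else "False"), "Message:"] ++
  PySem.Str.splitlines m.2.2.2.2 ++ [""]

def encode_to_text_v2 (data : List (String × String × String × String × String × String × Bool)) : String :=
  let threads : PySem.Dict (String × String) (List (String × String × String × Bool × String)) :=
    data.foldl (fun d row => d.modify (pvKeyOf row) [] (fun l => l ++ [pvMsgOf row])) PySem.Dict.empty
  let lines :=
    threads.items.foldl (fun acc kv =>
      kv.2.foldl (fun acc2 m => acc2 ++ pvMsgLines m)
        (acc ++ ["THREAD: " ++ kv.1.1 ++ " | Category: " ++ kv.1.2, ""])) pvHeader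
  PySem.Str.join "\n" lines

-- ===== PORT B =====
-- per-row emission, done directly from the row while filtering
def pvRowLines (row : String × String × String × String × String × String × Bool) : List String :=
  ["ID: " ++ row.1, "Author: " ++ PySem.Str.strip row.2.1,
   "Time: " ++ PySem.Str.strip row.2.2.2.2.2.1,
   "Nested: " ++ (if row.2.2.2.2.2.2 then "True" else "False"), "Message:"] ++
  PySem.Str.splitlines (PySem.Str.strip row.2.2.1) ++ [""]

def encode_to_text_v2_alt (data : List (String × String × String × String × String × String × Bool)) : String :=
  let keys := PySem.List.dedup (data.map pvKeyOf)
  let lines :=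
    keys.foldl (fun acc k =>
      data.foldl (fun acc2 row => if pvKeyOf row == k then acc2 ++ pvRowLines row else acc2)
        (acc ++ ["THREAD: " ++ k.1 ++ " | Category: " ++ k.2, ""])) pvHeader
  PySem.Str.join "\n" lines

-- ===== PRECONDITION & SPEC =====
def Spec_encode_to_text_v2 (data : List (String × String × String × String × String × String × Bool)) (out : String) : Prop := out = encode_to_text_v2_alt data
instance (data : List (String × String × String × String × String × String × Bool)) (out : String) : Decidable (Spec_encode_to_text_v2 data out) := by unfold Spec_encode_to_text_v2; infer_instance

-- ===== CLAIM =====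
def Claim_equal_encode_to_text_v2 : Prop := ∀ (data : List (String × String × String × String × String × String × Bool)), Dom_encode_to_text_v2 data → Spec_encode_to_text_v2 data (encode_to_text_v2 data)

-- ===== LEMMAS AND PROOFS =====

-- A's grouping dict, characterised: keys in first-appearance order, each bucket the filtered rows
lemma pvThreads_items (data : List (String × String × String × String × String × String × Bool)) :
    (data.foldl (fun d row => d.modify (pvKeyOf row) [] (fun l => l ++ [pvMsgOf row]))
      (PySem.Dict.empty : PySem.Dict (String × String) (List (String × String × String × Bool × String)))).items
    = (PySem.List.dedup (data.map pvKeyOf)).map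
        (fun k => (k, (data.filter (fun row => pvKeyOf row == k)).map pvMsgOf)) := by
  have hfold :
      data.foldl (fun d row => d.modify (pvKeyOf row) [] (fun l => l ++ [pvMsgOf row]))
        (PySem.Dict.empty : PySem.Dict (String × String) (List (String × String × String × Bool × String)))
      = (data.map (fun row => (pvKeyOf row, pvMsgOf row))).foldl
          (fun d p => d.modify p.1 [] (fun l => l ++ [p.2])) PySem.Dict.empty := by
    rw [List.foldl_map]
  rw [hfold]
  set l := data.map (fun row => (pvKeyOf row, pvMsgOf row)) with hl
  set d := l.foldl (fun d p => d.modify p.1 [] (fun l => l ++ [p.2]))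
      (PySem.Dict.empty : PySem.Dict (String × String) (List (String × String × String × Bool × String))) with hd
  have hnd : d.keys.Nodup := by
    rw [hd]
    exact PySem.Dict.nodup_keys_foldl_modify_key l (fun p => p.1) [] (fun _ p l => l ++ [p.2])
      PySem.Dict.empty (by simp)
  have hkeys : d.keys = PySem.List.dedup (data.map pvKeyOf) := by
    rw [hd, PySem.Dict.keys_foldl_modify_key]
    simp [PySem.Dict.keys_empty, PySem.Set.update, PySem.Set.ofList_eq_foldl, hl,
      List.map_map, Function.comp_def]
  have hitems := PySem.Dict.items_eq_map_keys d hnd ([] : List (String × String × String × Bool × String))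
  rw [hitems, hkeys]
  apply List.map_congr_left
  intro k hk
  have hget : d.getD k [] = (l.filter (fun p => p.1 == k)).map (·.2) := by
    rw [hd]
    rw [PySem.Dict.getD_foldl_modify_append]
    simp [PySem.Dict.getD_empty]
  rw [hget, hl]
  simp [List.filter_map, List.map_map, Function.comp_def]

-- per-message rendering agrees: A's dict-backed lines are B's direct row lines
lemma pvMsgLines_msgOf (row : String × String × String × String × String × String × Bool) :
    pvMsgLines (pvMsgOf row) = pvRowLines row := rfl

-- A's output loop, flattened
lemma pvLoopA (items : List ((String × String) × List (String × String × String × Bool × String)))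
    (init : List String) :
    items.foldl (fun acc kv =>
      kv.2.foldl (fun acc2 m => acc2 ++ pvMsgLines m)
        (acc ++ ["THREAD: " ++ kv.1.1 ++ " | Category: " ++ kv.1.2, ""])) init
    = init ++ items.flatMap (fun kv =>
        ["THREAD: " ++ kv.1.1 ++ " | Category: " ++ kv.1.2, ""] ++ kv.2.flatMap pvMsgLines) := by
  simp only [PySem.List.foldl_append_eq_flatMap, List.append_assoc]

-- B's output loop, flattened
lemma pvLoopB (data : List (String × String × String × String × String × String × Bool))
    (keys : List (String × String)) (init : List String) :
    keys.foldl (fun acc k =>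
      data.foldl (fun acc2 row => if pvKeyOf row == k then acc2 ++ pvRowLines row else acc2)
        (acc ++ ["THREAD: " ++ k.1 ++ " | Category: " ++ k.2, ""])) init
    = init ++ keys.flatMap (fun k =>
        ["THREAD: " ++ k.1 ++ " | Category: " ++ k.2, ""] ++
          (data.filter (fun row => pvKeyOf row == k)).flatMap pvRowLines) := by
  simp only [PySem.List.foldl_if_eq_foldl_filter, PySem.List.foldl_append_eq_flatMap,
    List.append_assoc]

-- ===== VERDICT =====
theorem encode_to_text_v2_spec : Claim_equal_encode_to_text_v2 := by
  intro data _
  show encode_to_text_v2 data = encode_to_text_v2_alt data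
  simp only [encode_to_text_v2, encode_to_text_v2_alt, pvThreads_items, pvLoopA, pvLoopB,
    List.flatMap_map, pvMsgLines_msgOf]
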